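-- pv_equiv track=rewrite | github.com/Mingdoo/coding_test_boom | 211006/강민수/42584_주식가격/s1.py | solution
-- ===== SOURCE A (Python) =====
-- def solution(prices):
--     time = [0] * len(prices)
--     for i in range(len(prices)):
--         for j in range(i+1, len(prices)):
--             if prices[j] >= prices[i]:
--                 time[i] += 1
--             else:
--                 time[i] += 1
--                 break
--     return time
-- ===== SOURCE B (Python) =====
-- def solution(prices):
--     n = len(prices)
--     out = []            # built back-to-front: out[0] will be the answer for the last index
--     stack = []          # (index, price) pairs; prices strictly increasing from the end (top)
--     for i, p in reversed(list(enumerate(prices))):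
--         while stack and stack[-1][1] >= p:
--             stack.pop()
--         out.append(stack[-1][0] - i if stack else n - 1 - i)
--         stack.append((i, p))
--     out.reverse()
--     return out
-- ===== Notes on version B (the rewrite author's own statement) =====
-- stated objective: faster
-- what changed: A rescans the tail of the list for every index (nested loops); B makes one right-to-left pass keeping a monotonic stack of (index, price) pairs and reads each answer off the stack top.
import Mathlib
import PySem

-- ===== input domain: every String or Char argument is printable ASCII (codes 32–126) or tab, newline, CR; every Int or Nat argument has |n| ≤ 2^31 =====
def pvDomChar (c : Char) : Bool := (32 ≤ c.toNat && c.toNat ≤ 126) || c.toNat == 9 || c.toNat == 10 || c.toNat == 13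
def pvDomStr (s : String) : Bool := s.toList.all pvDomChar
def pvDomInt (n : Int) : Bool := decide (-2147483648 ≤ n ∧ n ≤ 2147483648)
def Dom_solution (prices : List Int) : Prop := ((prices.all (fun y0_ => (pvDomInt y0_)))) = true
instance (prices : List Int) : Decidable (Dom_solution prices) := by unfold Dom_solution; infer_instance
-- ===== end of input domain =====

-- B replaces A's rescan of the tail for every index by a single right-to-left
-- pass with a monotonic stack; same return value on every input.

-- ===== PORT A =====
-- time[i] += 1  (i is always in range when A executes this)
def bumpA (time : List Int) (i : Int) : List Int :=
  PySem.List.pySetD time i (PySem.List.pyGetD time i 0 + 1)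

-- inner 'for j in range(i+1, len(prices))' with its break
def loopA (prices : List Int) (i : Int) (time : List Int) : List Int → List Int
  | [] => time
  | j :: js =>
    if PySem.List.pyGetD prices j 0 ≥ PySem.List.pyGetD prices i 0 then
      loopA prices i (bumpA time i) js
    else
      bumpA time i   -- break

def solution (prices : List Int) : List Int :=
  let n : Int := PySem.List.len prices
  (PySem.List.pyRange 0 n 1).foldl
    (fun time i => loopA prices i time (PySem.List.pyRange (i + 1) n 1))
    (List.replicate prices.length (0 : Int))

-- ===== PORT B =====
-- the 'while stack and stack[-1][1] >= p: stack.pop()' loop; stack top at the HEAD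
def popB (p : Int) : List (Int × Int) → List (Int × Int)
  | [] => []
  | (j, q) :: st => if q ≥ p then popB p st else (j, q) :: st

-- the 'for i, p in reversed(list(enumerate(prices)))' loop, carrying (stack, out);
-- out is appended to on the right exactly as Source B appends, and reversed at the end
def goB (n : Int) : List (Int × Int) → List (Int × Int) → List Int → List (Int × Int) × List Int
  | [], stack, out => (stack, out)
  | (i, p) :: rest, stack, out =>
      let stack' := popB p stack
      let v := match stack' with
        | [] => n - 1 - i
        | (j, _) :: _ => j - i
      goB n rest ((i, p) :: stack') (out ++ [v])

def solution_alt (prices : List Int) : List Int :=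
  let n : Int := PySem.List.len prices
  ((goB n ((PySem.List.enumerate prices 0).reverse) [] []).2).reverse

-- ===== PRECONDITION & SPEC =====
def Spec_solution (prices : List Int) (out : List Int) : Prop := out = solution_alt prices
instance (prices : List Int) (out : List Int) : Decidable (Spec_solution prices out) := by unfold Spec_solution; infer_instance

-- ===== CLAIM (what is proved, stated in full; the proofs are below) =====
def Claim_equal_solution : Prop := ∀ (prices : List Int), Dom_solution prices → Spec_solution prices (solution prices)

-- ===== LEMMAS AND PROOFS =====

-- common specification: A's time[i] as a function of the tail after index i
def gSpec (p : Int) : List Int → Int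
  | [] => 0
  | q :: tl => if q ≥ p then 1 + gSpec p tl else 1

def specL : List Int → List Int
  | [] => []
  | p :: tl => gSpec p tl :: specL tl

theorem length_specL (xs : List Int) : (specL xs).length = xs.length := by
  induction xs with
  | nil => rfl
  | cons p tl ih => simp [specL, ih]

theorem getElem_specL (xs : List Int) (k : Nat) (hk : k < xs.length) :
    (specL xs)[k]'(by rw [length_specL]; exact hk) = gSpec (xs[k]) (xs.drop (k + 1)) := by
  induction xs generalizing k with
  | nil => simp at hk
  | cons p tl ih =>
    cases k with
    | zero => simp [specL]
    | succ m => simpa [specL] using ih m (by simpa using hk)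

-- ===== A-side =====

theorem bumpA_eq (time : List Int) (k : Nat) :
    bumpA time (k : Int) = time.set k (time.getD k 0 + 1) := by
  simp [bumpA, PySem.List.pyGetD_natCast, PySem.List.pySetD_natCast]

theorem loopA_run (prices : List Int) (i : Nat) (hi : i < prices.length) :
    ∀ a : Nat, i < a → a ≤ prices.length → ∀ time : List Int, time.length = prices.length →
      loopA prices (i : Int) time (PySem.List.pyRange (a : Int) (PySem.List.len prices) 1)
        = time.set i (time.getD i 0 + gSpec (prices[i]) (prices.drop a)) := by
  intro a
  induction' hfuel : prices.length - a using Nat.strong_induction_on with fuel IH generalizing a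
  intro hia ha time htime
  rw [show (PySem.List.len prices) = ((prices.length : Int)) by simp [PySem.List.len]]
  rcases eq_or_lt_of_le ha with heq | hlt
  · -- a = len(prices): the range is empty and the drop is empty
    rw [PySem.List.pyRange_one_eq_nil (by exact_mod_cast heq.ge)]
    rw [show loopA prices (i : Int) time [] = time from rfl]
    rw [heq, List.drop_length, show gSpec prices[i] [] = 0 from rfl, add_zero]
    rw [List.getD_eq_getElem _ _ (by omega)]
    exact (List.set_getElem_self (by omega)).symm
  · -- a < len(prices): one step of the range
    rw [PySem.List.pyRange_one_cons (by exact_mod_cast hlt)]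
    have hgeta : PySem.List.pyGetD prices ((a : Nat) : Int) 0 = prices[a] := by
      rw [PySem.List.pyGetD_natCast]; exact List.getD_eq_getElem _ _ hlt
    have hgeti : PySem.List.pyGetD prices ((i : Nat) : Int) 0 = prices[i] := by
      rw [PySem.List.pyGetD_natCast]; exact List.getD_eq_getElem _ _ hi
    rw [show loopA prices (i : Int) time ((a : Int) :: PySem.List.pyRange ((a : Int) + 1) ((prices.length : Nat) : Int) 1)
          = (if PySem.List.pyGetD prices (a : Int) 0 ≥ PySem.List.pyGetD prices (i : Int) 0 then
               loopA prices (i : Int) (bumpA time (i : Int)) (PySem.List.pyRange ((a : Int) + 1) ((prices.length : Nat) : Int) 1)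
             else bumpA time (i : Int)) from rfl]
    rw [hgeta, hgeti]
    have hdrop : prices.drop a = prices[a] :: prices.drop (a + 1) :=
      (List.getElem_cons_drop hlt).symm
    rw [hdrop]
    by_cases hc : prices[a] ≥ prices[i]
    · rw [if_pos hc]
      have hrec := IH (prices.length - (a + 1)) (by omega) (a + 1) (by omega) (by omega)
        (by omega) (bumpA time (i : Int)) (by rw [bumpA_eq]; simp [htime])
      rw [show (PySem.List.len prices) = ((prices.length : Int)) by simp [PySem.List.len],
          show ((a + 1 : Nat) : Int) = ((a : Nat) : Int) + 1 by push_cast; ring] at hrec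
      rw [hrec, bumpA_eq, List.set_set]
      rw [List.getD_eq_getElem _ _ (by simp [htime]; omega),
          List.getElem_set_self (by simp [htime]; omega),
          List.getD_eq_getElem _ _ (by simp [htime]; omega)]
      rw [show gSpec prices[i] (prices[a] :: prices.drop (a + 1))
            = 1 + gSpec prices[i] (prices.drop (a + 1)) by simp [gSpec, hc]]
      ring_nf
    · rw [if_neg hc, bumpA_eq]
      rw [show gSpec prices[i] (prices[a] :: prices.drop (a + 1)) = 1 by simp [gSpec, hc]]

theorem solution_eq_specL (prices : List Int) : solution prices = specL prices := by
  have key : ∀ a : Nat, a ≤ prices.length →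
      (PySem.List.pyRange 0 (a : Int) 1).foldl
        (fun time i => loopA prices i time (PySem.List.pyRange (i + 1) (PySem.List.len prices) 1))
        (List.replicate prices.length (0 : Int))
      = (specL prices).take a ++ List.replicate (prices.length - a) (0 : Int) := by
    intro a
    induction a with
    | zero => intro _; simp
    | succ m ih =>
      intro hm
      rw [show ((m + 1 : Nat) : Int) = (m : Int) + 1 by push_cast; ring,
          PySem.List.pyRange_one_succ_right (by positivity), List.foldl_append,
          ih (by omega)]
      rw [show ∀ T : List Int, List.foldl
            (fun time i => loopA prices i time (PySem.List.pyRange (i + 1) (PySem.List.len prices) 1))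
            T [(m : Int)]
          = loopA prices (m : Int) T (PySem.List.pyRange ((m : Int) + 1) (PySem.List.len prices) 1)
          from fun T => rfl]
      have hrun := loopA_run prices m (by omega) (m + 1) (by omega) (by omega)
        ((specL prices).take m ++ List.replicate (prices.length - m) (0 : Int))
        (by simp [length_specL]; omega)
      rw [show ((m + 1 : Nat) : Int) = ((m : Nat) : Int) + 1 by push_cast; ring] at hrun
      rw [hrun]
      have hlenT : ((specL prices).take m).length = m := by
        simp [length_specL]; omega
      have hgetD : ((specL prices).take m ++ List.replicate (prices.length - m) (0 : Int)).getD m 0 = 0 := by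
        rw [List.getD_eq_getElem _ _ (by simp [hlenT]; omega),
            List.getElem_append_right (by omega)]
        simp
      rw [hgetD, List.set_append_right _ _ (by omega), hlenT, Nat.sub_self]
      rw [show prices.length - m = (prices.length - (m + 1)) + 1 by omega,
          List.replicate_succ, List.set_cons_zero]
      rw [List.take_add_one, List.getElem?_eq_getElem (by rw [length_specL]; omega),
          getElem_specL prices m (by omega)]
      simp
  have hfin := key prices.length le_rfl
  rw [Nat.sub_self, List.replicate_zero, List.append_nil,
      List.take_of_length_le (by rw [length_specL])] at hfin
  rw [show solution prices
        = (PySem.List.pyRange 0 (PySem.List.len prices) 1).foldl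
            (fun time i => loopA prices i time (PySem.List.pyRange (i + 1) (PySem.List.len prices) 1))
            (List.replicate prices.length (0 : Int)) from rfl]
  rw [show (PySem.List.len prices) = ((prices.length : Int)) by simp [PySem.List.len]]
  exact hfin

-- ===== B-side =====

-- the stack contents after the backward pass has consumed the suffix tl starting at index b
def stkB (b : Int) : List Int → List (Int × Int)
  | [] => []
  | q :: tl => (b, q) :: popB q (stkB (b + 1) tl)

theorem popB_popB (p q : Int) (h : p ≤ q) (st : List (Int × Int)) :
    popB p (popB q st) = popB p st := by
  induction st with
  | nil => rfl
  | cons e st ih =>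
    obtain ⟨j, r⟩ := e
    by_cases hr : r ≥ q
    · simp [popB, hr, ih, show r ≥ p by omega]
    · simp [popB, hr]

theorem gSpec_eq_popB (tl : List Int) (p : Int) (b : Int) :
    gSpec p tl =
      (match popB p (stkB b tl) with
       | [] => (tl.length : Int)
       | (j, _) :: _ => j - b + 1) := by
  induction tl generalizing b with
  | nil => simp [gSpec, stkB, popB]
  | cons q r ih =>
    by_cases hq : q ≥ p
    · rw [show stkB b (q :: r) = (b, q) :: popB q (stkB (b + 1) r) from rfl]
      rw [show popB p ((b, q) :: popB q (stkB (b + 1) r))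
            = popB p (popB q (stkB (b + 1) r)) by simp [popB, hq]]
      rw [popB_popB p q hq]
      rw [show gSpec p (q :: r) = 1 + gSpec p r by simp [gSpec, hq]]
      rw [ih (b + 1)]
      cases popB p (stkB (b + 1) r) with
      | nil =>
        show 1 + (r.length : Int) = ((q :: r).length : Int)
        simp
        omega
      | cons e st =>
        obtain ⟨j, s⟩ := e
        show 1 + (j - (b + 1) + 1) = j - b + 1
        omega
    · rw [show stkB b (q :: r) = (b, q) :: popB q (stkB (b + 1) r) from rfl]
      rw [show popB p ((b, q) :: popB q (stkB (b + 1) r))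
            = (b, q) :: popB q (stkB (b + 1) r) by simp [popB, hq]]
      simp [gSpec, hq]

theorem goB_append (n : Int) (l1 l2 : List (Int × Int)) (st : List (Int × Int)) (out : List Int) :
    goB n (l1 ++ l2) st out = goB n l2 (goB n l1 st out).1 (goB n l1 st out).2 := by
  induction l1 generalizing st out with
  | nil => rfl
  | cons e rest ih =>
    obtain ⟨i, p⟩ := e
    simp only [List.cons_append, goB]
    exact ih _ _

theorem goB_run (n : Int) (tl : List Int) :
    ∀ (b : Int) (out : List Int), n = b + tl.length →
      goB n ((PySem.List.enumerate tl b).reverse) [] out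
        = (stkB b tl, out ++ (specL tl).reverse) := by
  induction tl with
  | nil => intro b out h; simp [PySem.List.enumerate_nil, goB, specL, stkB]
  | cons q r ih =>
    intro b out h
    rw [PySem.List.enumerate_cons, List.reverse_cons, goB_append]
    rw [ih (b + 1) out (by simp at h ⊢; omega)]
    have hv : (match popB q (stkB (b + 1) r) with
               | [] => n - 1 - b
               | (j, _) :: _ => j - b) = gSpec q r := by
      rw [gSpec_eq_popB r q (b + 1)]
      cases popB q (stkB (b + 1) r) with
      | nil =>
        show n - 1 - b = (r.length : Int)
        simp at h
        omega
      | cons e st =>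
        obtain ⟨j, s⟩ := e
        show j - b = j - (b + 1) + 1
        omega
    show goB n [(b, q)] (stkB (b + 1) r) (out ++ (specL r).reverse) = _
    rw [show goB n [(b, q)] (stkB (b + 1) r) (out ++ (specL r).reverse)
          = ((b, q) :: popB q (stkB (b + 1) r),
             (out ++ (specL r).reverse) ++ [(match popB q (stkB (b + 1) r) with
               | [] => n - 1 - b
               | (j, _) :: _ => j - b)]) from rfl]
    rw [hv]
    rw [show stkB b (q :: r) = (b, q) :: popB q (stkB (b + 1) r) from rfl,
        show specL (q :: r) = gSpec q r :: specL r from rfl,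
        List.reverse_cons, List.append_assoc]

theorem solution_alt_eq_specL (prices : List Int) : solution_alt prices = specL prices := by
  rw [show solution_alt prices
        = ((goB (PySem.List.len prices) ((PySem.List.enumerate prices 0).reverse) [] []).2).reverse
        from rfl]
  rw [goB_run (PySem.List.len prices) prices 0 [] (by simp [PySem.List.len])]
  simp

-- ===== VERDICT (by name: the statement is the Claim_ definition above) =====
theorem solution_spec : Claim_equal_solution := by
  intro prices _
  unfold Spec_solution
  rw [solution_eq_specL, solution_alt_eq_specL]
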